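-- pv_equiv track=rewrite | github.com/AussieSeaweed/index-librorum-prohibitorum | dmoj/kickstart17r6p1/main.py | solve
-- ===== SOURCE A (Python) =====
-- def solve(E):
--     min_, max_ = 1, len(E)
--
--     while min_ != max_:
--         i = (len(E) - 1) // 2
--         e = E.pop(i)
--
--         if e == min_:
--             min_ = min_ + 1
--         elif e == max_:
--             max_ = max_ - 1
--         else:
--             return False
--
--     return True
-- ===== SOURCE B (Python) =====
-- def solve(E):
--     # Two-pointer single pass over the original list (no mutation): a middle
--     # pop always removes the last element of the left half or the first
--     # element of the right half; the side is chosen by comparing segment sizes.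
--     n = len(E)
--     min_, max_ = 1, n
--     l = (n - 1) // 2        # next index to take on the left side
--     r = l + 1               # next index to take on the right side
--     while min_ != max_:
--         if l + 1 >= n - r:
--             e = E[l]
--             l -= 1
--         else:
--             e = E[r]
--             r += 1
--         if e == min_:
--             min_ += 1
--         elif e == max_:
--             max_ -= 1
--         else:
--             return False
--     return True
-- ===== Notes on version B (the rewrite author's own statement) =====
-- stated objective: alternative
-- what changed: Instead of repeatedly popping the middle element of a shrinking, mutated list, B observes that every middle pop removes either the last element of the left half or the first element of the right half, and walks the original list once with two pointers from the centre outward, choosing the side by comparing segment sizes; it avoids A's in-place destruction of the argument and its O(n) cost per pop on accepting inputs.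
import Mathlib
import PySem

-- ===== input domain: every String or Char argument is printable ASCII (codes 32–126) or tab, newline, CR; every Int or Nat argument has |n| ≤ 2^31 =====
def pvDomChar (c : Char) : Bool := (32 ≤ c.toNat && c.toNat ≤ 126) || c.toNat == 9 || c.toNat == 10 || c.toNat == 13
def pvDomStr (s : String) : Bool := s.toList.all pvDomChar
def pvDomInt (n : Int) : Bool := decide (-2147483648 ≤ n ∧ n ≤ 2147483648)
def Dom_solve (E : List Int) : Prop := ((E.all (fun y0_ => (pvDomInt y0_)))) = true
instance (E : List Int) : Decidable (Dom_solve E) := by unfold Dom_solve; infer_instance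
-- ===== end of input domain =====

-- B replaces A's repeated middle-pops of a mutated list by a single two-pointer
-- centre-outward pass over the unchanged list (objective: alternative algorithm);
-- equivalence is about the RETURN value only (Python A empties its argument in
-- place, B does not mutate it).

-- ===== PORT A =====
-- A's while loop: fuel = max_ - min_ (the gap shrinks by one per iteration); the
-- `if mn = mx` test is the Python loop condition; pop? none = Python's IndexError.
def solveLoop (fuel : Nat) (E : List Int) (mn mx : Int) : Bool :=
  if mn = mx then true
  else
    match fuel with
    | 0 => false
    | f + 1 =>
      match PySem.List.pop? E (PySem.Int.floordiv ((E.length : Int) - 1) 2) with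
      | none => false
      | some (e, E') =>
        if e = mn then solveLoop f E' (mn + 1) mx
        else if e = mx then solveLoop f E' mn (mx - 1)
        else false

def solve (E : List Int) : Bool :=
  solveLoop (((E.length : Int) - 1)).toNat E 1 (E.length : Int)

-- ===== PORT B =====
-- B's while loop: same fuel convention; l and r are the two pointers of Source B.
def solveAltLoop (fuel : Nat) (E : List Int) (l r mn mx : Int) : Bool :=
  if mn = mx then true
  else
    match fuel with
    | 0 => false
    | f + 1 =>
      let step :=
        if l + 1 ≥ (E.length : Int) - r then (PySem.List.pyGet? E l, l - 1, r)
        else (PySem.List.pyGet? E r, l, r + 1)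
      match step.1 with
      | none => false
      | some e =>
        if e = mn then solveAltLoop f E step.2.1 step.2.2 (mn + 1) mx
        else if e = mx then solveAltLoop f E step.2.1 step.2.2 mn (mx - 1)
        else false

def solve_alt (E : List Int) : Bool :=
  let n : Int := E.length
  let l := PySem.Int.floordiv (n - 1) 2
  solveAltLoop (n - 1).toNat E l (l + 1) 1 n

-- ===== PRECONDITION & SPEC =====
-- Pre_ excludes only the empty list, on which Python A (and Python B) raise IndexError.
def Pre_solve (E : List Int) : Prop := E ≠ []
instance (E : List Int) : Decidable (Pre_solve E) := by unfold Pre_solve; infer_instance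
def pvWitness_solve : List Int := ([2, 1, 3])

def Spec_solve (E : List Int) (out : Bool) : Prop := out = solve_alt E
instance (E : List Int) (out : Bool) : Decidable (Spec_solve E out) := by unfold Spec_solve; infer_instance

-- ===== CLAIM (what is proved, stated in full; the proofs are below) =====
def Claim_equal_solve : Prop := ∀ (E : List Int), Dom_solve E → Pre_solve E → Spec_solve E (solve E)

-- ===== LEMMAS AND PROOFS =====

-- Invariant: A's current list is E.take p ++ E.drop (n - s) (left segment of p
-- elements, right segment of s elements, |p - s| <= 1), and B's pointers stand at
-- l = p - 1 and r = n - s.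
lemma loop_eq (fuel : Nat) : ∀ (E : List Int) (p s : Nat) (mn mx : Int),
    p + s ≤ E.length → s ≤ p + 1 → p ≤ s + 1 →
    (fuel : Int) = mx - mn → fuel + 1 = p + s →
    solveLoop fuel (E.take p ++ E.drop (E.length - s)) mn mx
      = solveAltLoop fuel E ((p : Int) - 1) ((E.length : Int) - (s : Int)) mn mx := by
  induction fuel with
  | zero =>
    intro E p s mn mx _ _ _ hf _
    have hmn : mn = mx := by omega
    simp [solveLoop, solveAltLoop, hmn]
  | succ f ih =>
    intro E p s mn mx hps hs hp hf hfuel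
    have hmn : mn ≠ mx := by omega
    have hpn : p ≤ E.length := by omega
    have hsn : s ≤ E.length := by omega
    have hL : (E.take p ++ E.drop (E.length - s)).length = p + s := by
      simp [List.length_take, List.length_drop]; omega
    rw [solveLoop, solveAltLoop]
    simp only [hmn, ite_false]
    have hidx : PySem.Int.floordiv (((E.take p ++ E.drop (E.length - s)).length : Int) - 1) 2
        = (((p + s - 1) / 2 : Nat) : Int) := by
      rw [hL]
      have h1 : ((p + s : Nat) : Int) - 1 = ((p + s - 1 : Nat) : Int) := by omega
      rw [h1]
      exact_mod_cast PySem.Int.floordiv_natCast (p + s - 1) 2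
    by_cases hcase : s ≤ p

    · -- pop from the left segment: index p - 1
      have hp1 : 1 ≤ p := by omega
      have hi : (p + s - 1) / 2 = p - 1 := by omega
      rw [hidx, hi]
      have hlt : p - 1 < (E.take p ++ E.drop (E.length - s)).length := by omega
      rw [PySem.List.pop?_natCast _ _ hlt]
      have hget : (E.take p ++ E.drop (E.length - s))[p - 1]'hlt = E[p - 1]'(by omega) := by
        rw [List.getElem_append_left (by simp; omega)]; simp
      have herase : (E.take p ++ E.drop (E.length - s)).eraseIdx (p - 1)
          = E.take (p - 1) ++ E.drop (E.length - s) := by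
        rw [List.eraseIdx_eq_take_drop_succ]
        congr 1
        · rw [List.take_append_of_le_length (by simp; omega), List.take_take]
          congr 1; omega
        · have h2 : p - 1 + 1 = p := by omega
          rw [h2, List.drop_append_of_le_length (by simp [hpn])]
          simp
      rw [hget, herase]
      -- B side: left branch
      have hc : ((p : Int) - 1) + 1 ≥ (E.length : Int) - ((E.length : Int) - (s : Int)) := by omega
      rw [if_pos hc]
      have hcast : ((p : Int) - 1) = ((p - 1 : Nat) : Int) := by omega
      rw [hcast, PySem.List.pyGet?_natCast, List.getElem?_eq_getElem (by omega)]
      simp only []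
      by_cases h1 : E[p - 1]'(by omega) = mn
      · rw [if_pos h1, if_pos h1,
          ih E (p - 1) s (mn + 1) mx (by omega) (by omega) (by omega) (by omega) (by omega)]
      · rw [if_neg h1, if_neg h1]
        by_cases h2 : E[p - 1]'(by omega) = mx
        · rw [if_pos h2, if_pos h2,
            ih E (p - 1) s mn (mx - 1) (by omega) (by omega) (by omega) (by omega) (by omega)]
        · rw [if_neg h2, if_neg h2]
    · -- pop from the right segment: index p (= first element of the right part)
      have hs1 : s = p + 1 := by omega
      have hi : (p + s - 1) / 2 = p := by omega
      rw [hidx, hi]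
      have hlt : p < (E.take p ++ E.drop (E.length - s)).length := by omega
      rw [PySem.List.pop?_natCast _ _ hlt]
      have hns : E.length - s < E.length := by omega
      have hget : (E.take p ++ E.drop (E.length - s))[p]'hlt = E[E.length - s]'hns := by
        rw [List.getElem_append_right (by simp [hpn])]
        simp [hpn]
      have herase : (E.take p ++ E.drop (E.length - s)).eraseIdx p
          = E.take p ++ E.drop (E.length - (s - 1)) := by
        rw [List.eraseIdx_eq_take_drop_succ]
        congr 1
        · rw [List.take_append_of_le_length (by simp [hpn]), List.take_take]
          congr 1; omega
        · have h2 : (E.take p).length = p := by simp [hpn]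
          calc (E.take p ++ E.drop (E.length - s)).drop (p + 1)
              = (E.drop (E.length - s)).drop 1 := by
                rw [show p + 1 = (E.take p).length + 1 by rw [h2]]
                simp [List.drop_append]
            _ = E.drop (E.length - (s - 1)) := by
                rw [List.drop_drop]; congr 1; omega
      rw [hget, herase]
      -- B side: right branch
      have hc : ¬ (((p : Int) - 1) + 1 ≥ (E.length : Int) - ((E.length : Int) - (s : Int))) := by omega
      rw [if_neg hc]
      have hcast : (E.length : Int) - (s : Int) = ((E.length - s : Nat) : Int) := by omega
      rw [hcast, PySem.List.pyGet?_natCast, List.getElem?_eq_getElem hns]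
      have hcast2 : ((E.length - s : Nat) : Int) + 1 = (E.length : Int) - ((s - 1 : Nat) : Int) := by omega
      rw [hcast2]
      simp only []
      by_cases h1 : E[E.length - s]'hns = mn
      · rw [if_pos h1, if_pos h1,
          ih E p (s - 1) (mn + 1) mx (by omega) (by omega) (by omega) (by omega) (by omega)]
      · rw [if_neg h1, if_neg h1]
        by_cases h2 : E[E.length - s]'hns = mx
        · rw [if_pos h2, if_pos h2,
            ih E p (s - 1) mn (mx - 1) (by omega) (by omega) (by omega) (by omega) (by omega)]
        · rw [if_neg h2, if_neg h2]

theorem solve_spec : Claim_equal_solve := by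
  intro E _ hpre
  unfold Spec_solve solve solve_alt
  have hn : 1 ≤ E.length := List.length_pos_of_ne_nil hpre
  set n := E.length with hdefn
  have h1 : ((n : Int) - 1).toNat = n - 1 := by omega
  have hl : PySem.Int.floordiv ((n : Int) - 1) 2 = (((n - 1) / 2 : Nat) : Int) := by
    have h2 : ((n : Int) - 1) = ((n - 1 : Nat) : Int) := by omega
    rw [h2]; exact_mod_cast PySem.Int.floordiv_natCast (n - 1) 2
  have hp : (n - 1) / 2 + 1 ≤ n := by omega
  have key := loop_eq (n - 1) E ((n - 1) / 2 + 1) (n - ((n - 1) / 2 + 1)) 1 (n : Int)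
    (by omega) (by omega) (by omega) (by omega) (by omega)
  simp only [h1, hl]
  have hsplit : E.take ((n - 1) / 2 + 1) ++ E.drop (n - (n - ((n - 1) / 2 + 1))) = E := by
    have h3 : n - (n - ((n - 1) / 2 + 1)) = (n - 1) / 2 + 1 := by omega
    rw [h3, List.take_append_drop]
  rw [hsplit] at key
  rw [key]
  congr 1
  · omega
  · omega
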